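-- pv_equiv track=rewrite | github.com/sgodey8/PII-Filter-Gliner | gliner.py | char_to_token_index
-- ===== SOURCE A (Python) =====
-- def char_to_token_index(char_index, tokenized_text):
--     token_index = 0
--     char_count = 0
--     for token in tokenized_text:
--         if char_count + len(token) > char_index:
--             return token_index
--         char_count += len(token) + 1  # +1 for the space
--         token_index += 1
--     return token_index
-- ===== SOURCE B (Python) =====
-- from itertools import accumulate
-- from bisect import bisect_right
--
--
-- def char_to_token_index(char_index, tokenized_text):
--     # ends[i] = character position just past token i's own characters
--     ends = [c - 1 for c in accumulate(len(t) + 1 for t in tokenized_text)]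
--     return bisect_right(ends, char_index)
-- ===== Notes on version B (the rewrite author's own statement) =====
-- stated objective: alternative
-- what changed: Replaces the early-exit linear scan with running counters by building a cumulative token-end-position table (itertools.accumulate) and locating the containing token with a single binary search (bisect_right).
import Mathlib
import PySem

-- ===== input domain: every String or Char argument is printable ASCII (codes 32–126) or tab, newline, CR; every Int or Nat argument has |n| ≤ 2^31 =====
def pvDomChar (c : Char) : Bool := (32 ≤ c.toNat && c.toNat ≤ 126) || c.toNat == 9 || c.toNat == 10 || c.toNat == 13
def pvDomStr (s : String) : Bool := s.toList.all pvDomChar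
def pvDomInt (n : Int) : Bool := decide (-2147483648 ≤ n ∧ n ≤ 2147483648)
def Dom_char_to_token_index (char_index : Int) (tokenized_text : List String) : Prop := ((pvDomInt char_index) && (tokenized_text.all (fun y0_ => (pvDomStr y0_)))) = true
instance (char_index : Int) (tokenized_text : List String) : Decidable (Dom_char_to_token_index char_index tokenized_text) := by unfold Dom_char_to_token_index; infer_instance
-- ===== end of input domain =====

-- B replaces A's early-exit linear scan by a cumulative end-position table plus a binary search (alternative decomposition).

-- ===== PORT A =====
-- the for-loop of A: state (char_count, token_index), early return inside the loop
def ctiGo (char_index : Int) : List String → Int → Int → Int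
  | [], _, token_index => token_index
  | token :: rest, char_count, token_index =>
    if char_count + PySem.Str.len token > char_index then token_index
    else ctiGo char_index rest (char_count + PySem.Str.len token + 1) (token_index + 1)

def char_to_token_index (char_index : Int) (tokenized_text : List String) : Int :=
  ctiGo char_index tokenized_text 0 0

-- ===== PORT B =====
-- itertools.accumulate over a list of Ints (running sums, no initial value)
def pyAccumulate (acc : Int) : List Int → List Int
  | [] => []
  | x :: rest => (acc + x) :: pyAccumulate (acc + x) rest

def char_to_token_index_alt (char_index : Int) (tokenized_text : List String) : Int :=
  let ends := (pyAccumulate 0 (tokenized_text.map (fun t => PySem.Str.len t + 1))).map (· - 1)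
  ((PySem.List.bisectRight ends char_index : Nat) : Int)

-- ===== PRECONDITION & SPEC =====
def Spec_char_to_token_index (char_index : Int) (tokenized_text : List String) (out : Int) : Prop := out = char_to_token_index_alt char_index tokenized_text
instance (char_index : Int) (tokenized_text : List String) (out : Int) : Decidable (Spec_char_to_token_index char_index tokenized_text out) := by unfold Spec_char_to_token_index; infer_instance

-- ===== CLAIM (what is proved, stated in full; the proofs are below) =====
def Claim_equal_char_to_token_index : Prop := ∀ (char_index : Int) (tokenized_text : List String), Dom_char_to_token_index char_index tokenized_text → Spec_char_to_token_index char_index tokenized_text (char_to_token_index char_index tokenized_text)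

-- ===== LEMMAS AND PROOFS =====

-- reference list: end position (start + length) of each token, starting at offset s
def endsFrom (s : Int) : List String → List Int
  | [] => []
  | t :: rest => (s + PySem.Str.len t) :: endsFrom (s + PySem.Str.len t + 1) rest

-- reference index: first position whose end exceeds char_index
def firstIdx (c : Int) : List Int → Nat
  | [] => 0
  | e :: rest => if c < e then 0 else firstIdx c rest + 1

lemma len_nonneg (t : String) : 0 ≤ PySem.Str.len t := by
  simp [PySem.Str.len_eq]

lemma ends_eq (ts : List String) : ∀ s : Int,
    (pyAccumulate s (ts.map (fun t => PySem.Str.len t + 1))).map (· - 1) = endsFrom s ts := by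
  induction ts with
  | nil => intro s; simp [pyAccumulate, endsFrom]
  | cons t rest ih =>
    intro s
    simp only [List.map_cons, pyAccumulate, endsFrom]
    rw [show s + (PySem.Str.len t + 1) = s + PySem.Str.len t + 1 from by ring, ih]
    congr 1
    omega

lemma mem_endsFrom_ge {x : Int} : ∀ (ts : List String) (s : Int), x ∈ endsFrom s ts → s ≤ x := by
  intro ts
  induction ts with
  | nil => intro s h; simp [endsFrom] at h
  | cons t rest ih =>
    intro s h
    simp only [endsFrom, List.mem_cons] at h
    rcases h with h | h
    · have := len_nonneg t; omega
    · have := ih (s + PySem.Str.len t + 1) h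
      have := len_nonneg t; omega

lemma endsFrom_pairwise : ∀ (ts : List String) (s : Int), (endsFrom s ts).Pairwise (· ≤ ·) := by
  intro ts
  induction ts with
  | nil => intro s; simp [endsFrom]
  | cons t rest ih =>
    intro s
    simp only [endsFrom, List.pairwise_cons]
    refine ⟨fun y hy => ?_, ih _⟩
    have := mem_endsFrom_ge rest (s + PySem.Str.len t + 1) hy
    omega

-- any index satisfying bisect_right's characterization equals firstIdx
lemma firstIdx_unique (c : Int) : ∀ (E : List Int) (r : Nat),
    r ≤ E.length →
    (∀ (j : Nat) (hj : j < E.length), j < r → E[j] ≤ c) →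
    (∀ (j : Nat) (hj : j < E.length), r ≤ j → c < E[j]) →
    r = firstIdx c E := by
  intro E
  induction E with
  | nil => intro r h1 _ _; simpa [firstIdx] using Nat.le_zero.mp (by simpa using h1)
  | cons e rest ih =>
    intro r h1 h2 h3
    by_cases hc : c < e
    · simp only [firstIdx, if_pos hc]
      by_contra hr
      have hr0 : 0 < r := Nat.pos_of_ne_zero hr
      have := h2 0 (by simp) hr0
      simp at this; omega
    · simp only [firstIdx, if_neg hc]
      have hr0 : r ≠ 0 := by
        intro h0
        have := h3 0 (by simp) (by omega)
        simp at this; omega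
      obtain ⟨r', rfl⟩ := Nat.exists_eq_succ_of_ne_zero hr0
      have := ih r' (by simpa using h1)
        (fun j hj hjr => by
          have := h2 (j + 1) (by simpa using Nat.succ_lt_succ hj) (by omega)
          simpa using this)
        (fun j hj hjr => by
          have := h3 (j + 1) (by simpa using Nat.succ_lt_succ hj) (by omega)
          simpa using this)
      omega

lemma bisectRight_eq_firstIdx (c : Int) (E : List Int) (hE : E.Pairwise (· ≤ ·)) :
    PySem.List.bisectRight E c = firstIdx c E := by
  obtain ⟨h1, h2, h3⟩ := PySem.List.bisectRight_spec E c hE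
  exact firstIdx_unique c E _ h1 h2 h3

lemma ctiGo_eq (c : Int) : ∀ (ts : List String) (s k : Int),
    ctiGo c ts s k = k + (firstIdx c (endsFrom s ts) : Int) := by
  intro ts
  induction ts with
  | nil => intro s k; simp [ctiGo, endsFrom, firstIdx]
  | cons t rest ih =>
    intro s k
    simp only [ctiGo, endsFrom, firstIdx]
    by_cases h : s + PySem.Str.len t > c
    · rw [if_pos h, if_pos (by omega)]
      simp
    · rw [if_neg h, if_neg (by omega), ih]
      push_cast
      ring

-- ===== VERDICT (by name: the statement is the Claim_ definition above) =====
theorem char_to_token_index_spec : Claim_equal_char_to_token_index := by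
  intro c ts _
  unfold Spec_char_to_token_index char_to_token_index char_to_token_index_alt
  rw [ctiGo_eq]
  show _ = ((PySem.List.bisectRight ((pyAccumulate 0 (ts.map (fun t => PySem.Str.len t + 1))).map (· - 1)) c : Nat) : Int)
  rw [ends_eq, bisectRight_eq_firstIdx c _ (endsFrom_pairwise ts 0)]
  simp
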